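-- pv_equiv track=rewrite | github.com/fbfytda-dotcom/Elova- | fix_strings.py | fix_broken_strings
-- ===== SOURCE A (Python) =====
-- def fix_broken_strings(content):
--     lines = content.split('\n')
--     changed = True
--     while changed:
--         changed = False
--         result = []
--         i = 0
--         while i < len(lines):
--             line = lines[i]
--             dq = line.count('"') - line.count('\\"')
--             if dq % 2 == 1 and i + 1 < len(lines):
--                 lines[i + 1] = line + ' ' + lines[i + 1].lstrip()
--                 changed = True
--                 i += 1
--                 continue
--             result.append(line)
--             i += 1
--         lines = result
--     return '\n'.join(lines)
-- ===== SOURCE B (Python) =====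
-- def fix_broken_strings(content):
--     lines = content.split('\n')
--     n = len(lines)
--     result = []
--     i = 0
--     while i < n:
--         cur = lines[i]
--         while (cur.count('"') - cur.count('\\"')) % 2 == 1 and i + 1 < n:
--             i += 1
--             cur = cur + ' ' + lines[i].lstrip()
--         result.append(cur)
--         i += 1
--     return '\n'.join(result)
-- ===== Notes on version B (the rewrite author's own statement) =====
-- stated objective: simpler
-- what changed: Replaced the repeat-until-unchanged fixpoint of full passes (which rebuilds the line list and mutates the successor line in place) by a single forward pass that grows an accumulator line until its unescaped-quote count is even, appending each settled line once.
import Mathlib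
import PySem

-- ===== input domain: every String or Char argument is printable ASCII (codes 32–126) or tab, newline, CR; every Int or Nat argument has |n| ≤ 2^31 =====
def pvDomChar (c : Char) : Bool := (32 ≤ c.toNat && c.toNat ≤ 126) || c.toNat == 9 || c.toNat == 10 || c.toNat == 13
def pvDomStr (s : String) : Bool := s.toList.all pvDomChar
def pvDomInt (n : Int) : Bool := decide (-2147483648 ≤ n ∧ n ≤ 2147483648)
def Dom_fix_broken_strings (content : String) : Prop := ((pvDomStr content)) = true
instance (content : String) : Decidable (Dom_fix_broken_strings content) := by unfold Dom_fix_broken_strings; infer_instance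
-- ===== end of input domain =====

-- B replaces A's repeat-until-unchanged sequence of full merge passes by a single forward
-- pass with an accumulator line (simpler decomposition); return value proved identical.


-- shared by both ports (both Pythons compute exactly this test on a line):
-- dq = line.count('"') - line.count('\\"');  dq % 2 == 1
def pvOdd (s : String) : Bool :=
  PySem.Int.mod ((PySem.Str.count s "\"" : Int) - (PySem.Str.count s "\\\"" : Int)) 2 == 1

-- content.split('\n')  (sep nonempty, exact)
def pvSplitNL (content : String) : List String :=
  (PySem.Chars.splitOn content.toList ['\n']).map String.ofList

-- ===== PORT A =====
-- A's inner indexed while-loop: only lines[i:] is ever read again, and the only mutation is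
-- lines[i+1] = line + ' ' + lines[i+1].lstrip(); so the loop is this recursion on the suffix,
-- returning (result, changed).
def pvPassA : List String → List String × Bool
  | [] => ([], false)
  | [l] => ([l], false)
  | l :: l2 :: rest =>
    if pvOdd l then
      ((pvPassA ((l ++ " " ++ PySem.Str.lstrip l2) :: rest)).1, true)
    else
      ((l :: (pvPassA (l2 :: rest)).1), (pvPassA (l2 :: rest)).2)
termination_by ls => ls.length

-- termination fact for the outer while-changed loop: a changed pass shortens the list
theorem pvPassA_length_le (ls : List String) : (pvPassA ls).1.length ≤ ls.length := by
  fun_induction pvPassA ls with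
  | case1 => simp
  | case2 => simp
  | case3 l l2 rest h ih => simpa using Nat.le_trans ih (by simp)
  | case4 l l2 rest h ih => simpa using ih

theorem pvPassA_length_lt (ls : List String) (h : (pvPassA ls).2 = true) :
    (pvPassA ls).1.length < ls.length := by
  fun_induction pvPassA ls with
  | case1 => simp at h
  | case2 => simp at h
  | case3 l l2 rest hodd ih =>
    have := pvPassA_length_le ((l ++ " " ++ PySem.Str.lstrip l2) :: rest)
    simp at this ⊢; omega
  | case4 l l2 rest hodd ih => simp at h ⊢; have := ih h; simp at this; omega

-- A's outer 'while changed' fixpoint loop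
def pvFixA (lines : List String) : List String :=
  if _h : (pvPassA lines).2 = true then pvFixA (pvPassA lines).1 else (pvPassA lines).1
termination_by lines.length
decreasing_by exact pvPassA_length_lt lines _h

def fix_broken_strings (content : String) : String :=
  PySem.Str.join "\n" (pvFixA (pvSplitNL content))

-- ===== PORT B =====
-- B's inner while: grow cur by the lstripped next line while cur's unescaped-quote count is odd
def pvAbsorb : String → List String → String × List String
  | cur, [] => (cur, [])
  | cur, r :: rs =>
    if pvOdd cur then pvAbsorb (cur ++ " " ++ PySem.Str.lstrip r) rs else (cur, r :: rs)

theorem pvAbsorb_length_le (cur : String) (rs : List String) :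
    (pvAbsorb cur rs).2.length ≤ rs.length := by
  induction rs generalizing cur with
  | nil => simp [pvAbsorb]
  | cons r rs ih =>
    simp only [pvAbsorb]
    split
    · exact Nat.le_trans (ih _) (by simp)
    · simp

-- B's outer single pass over the lines, emitting one settled line at a time
def pvGoB : List String → List String
  | [] => []
  | l :: rest => (pvAbsorb l rest).1 :: pvGoB (pvAbsorb l rest).2
termination_by ls => ls.length
decreasing_by exact Nat.lt_succ_of_le (pvAbsorb_length_le l rest)

def fix_broken_strings_alt (content : String) : String :=
  PySem.Str.join "\n" (pvGoB (pvSplitNL content))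

-- ===== PRECONDITION & SPEC =====
def Spec_fix_broken_strings (content : String) (out : String) : Prop := out = fix_broken_strings_alt content
instance (content : String) (out : String) : Decidable (Spec_fix_broken_strings content out) := by unfold Spec_fix_broken_strings; infer_instance

-- ===== CLAIM (what is proved, stated in full; the proofs are below) =====
def Claim_equal_fix_broken_strings : Prop := ∀ (content : String), Dom_fix_broken_strings content → Spec_fix_broken_strings content (fix_broken_strings content)

-- ===== LEMMAS AND PROOFS =====

-- B's single pass computes exactly A's first pass
theorem pvGoB_eq_passA (ls : List String) : pvGoB ls = (pvPassA ls).1 := by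
  fun_induction pvPassA ls with
  | case1 => simp [pvGoB]
  | case2 l => simp [pvGoB, pvAbsorb]
  | case3 l l2 rest h ih =>
    have : pvGoB (l :: l2 :: rest) = pvGoB ((l ++ " " ++ PySem.Str.lstrip l2) :: rest) := by
      simp only [pvGoB, pvAbsorb, h, if_pos]
    simp [this, ih]
  | case4 l l2 rest h ih =>
    simp only [pvGoB, pvAbsorb, h]
    simp [← ih, pvGoB]

-- every line of a pass's result except the last has an even unescaped-quote count
theorem pvPassA_result_even (ls : List String) :
    ∀ x ∈ (pvPassA ls).1.dropLast, pvOdd x = false := by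
  fun_induction pvPassA ls with
  | case1 => simp
  | case2 l => simp
  | case3 l l2 rest h ih => simpa using ih
  | case4 l l2 rest h ih =>
    intro x hx
    rcases (pvPassA (l2 :: rest)).1.eq_nil_or_concat with hn | ⟨ys, y, hys⟩
    · simp [hn] at hx
    · simp only [hys, List.concat_eq_append] at hx ih
      rw [show l :: (ys ++ [y]) = (l :: ys) ++ [y] from rfl, List.dropLast_concat] at hx
      cases hx with
      | head => simpa using h
      | tail _ hx => exact ih x (by rw [List.dropLast_concat]; exact hx)

-- on such a list a pass is the identity and reports no change
theorem pvPassA_of_even (ls : List String)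
    (h : ∀ x ∈ ls.dropLast, pvOdd x = false) : pvPassA ls = (ls, false) := by
  induction ls with
  | nil => simp [pvPassA]
  | cons l tail ih =>
    cases tail with
    | nil => simp [pvPassA]
    | cons l2 rest =>
      have hl : pvOdd l = false := h l (by simp)
      have : pvPassA (l2 :: rest) = (l2 :: rest, false) := by
        apply ih; intro x hx
        exact h x (by simp [List.dropLast_cons_of_ne_nil] at hx ⊢; exact Or.inr hx)
      simp [pvPassA, hl, this]

-- hence A's fixpoint loop terminates after its first effective pass
theorem pvFixA_eq_passA (ls : List String) : pvFixA ls = (pvPassA ls).1 := by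
  rw [pvFixA]
  split
  · rw [pvFixA]; simp [pvPassA_of_even _ (pvPassA_result_even ls)]
  · rfl

-- ===== VERDICT (by name: the statement is the Claim_ definition above) =====
theorem fix_broken_strings_spec : Claim_equal_fix_broken_strings := by
  intro content _
  unfold Spec_fix_broken_strings fix_broken_strings fix_broken_strings_alt
  rw [pvFixA_eq_passA, pvGoB_eq_passA]
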